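-- pv_equiv track=rewrite | github.com/Jiahao-Zhangg/BoN_REBEL | src/ultrafeedback_judge/checklist_judge_local_explanation_clean.py | get_numeric_mode
-- ===== SOURCE A (Python) =====
-- from collections import Counter
--
-- def get_numeric_mode(values, score_range=None):
--     """
--     Get the mode (most frequent value) from a list of numeric values.
--     For numeric scores ranging from 0 to max_score.
--
--     Args:
--         values: List of numeric values
--         score_range: Tuple of (min_score, max_score) for the valid range
--
--     Returns:
--         The most frequent value, or the median of tied values if multiple modes exist
--     """
--     if not values:
--         return None
--
--     # Convert to integers and filter valid values if score_range is provided
--     if score_range: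
--         min_score, max_score = score_range
--         values = [int(v) for v in values if min_score <= int(v) <= max_score]
--     else:
--         values = [int(v) for v in values]
--
--     if not values:
--         return None
--
--     counts = Counter(values)
--     max_count = max(counts.values())
--     modes = [k for k, v in counts.items() if v == max_count]
--
--     # If there's a unique mode, return it
--     if len(modes) == 1:
--         return modes[0]
--
--     # If there are multiple modes, return the median of the modes
--     # This provides a reasonable tie-breaking strategy for numeric values
--     modes.sort()
--     return modes[len(modes) // 2]
-- ===== SOURCE B (Python) =====
-- def get_numeric_mode(values, score_range=None):
--     if score_range:
--         min_score, max_score = score_range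
--         vals = [int(v) for v in values if min_score <= int(v) <= max_score]
--     else:
--         vals = [int(v) for v in values]
--     if not vals:
--         return None
--     distinct = []
--     counts = []
--     for v in sorted(vals):
--         if distinct and v == distinct[-1]:
--             counts[-1] += 1
--         else:
--             distinct.append(v)
--             counts.append(1)
--     best = max(counts)
--     modes = [d for d, c in zip(distinct, counts) if c == best]
--     return modes[len(modes) // 2]
-- ===== Notes on version B (the rewrite author's own statement) =====
-- stated objective: alternative
-- what changed: Replaces the Counter/max-over-values/unique-mode-branch pipeline by sorting the cleaned list and doing a run-length scan of consecutive equal values (building distinct values and their run lengths in ascending order), then returning modes[len(modes)//2] uniformly (a singleton modes list makes the unique-mode case the same index).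
import Mathlib
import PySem

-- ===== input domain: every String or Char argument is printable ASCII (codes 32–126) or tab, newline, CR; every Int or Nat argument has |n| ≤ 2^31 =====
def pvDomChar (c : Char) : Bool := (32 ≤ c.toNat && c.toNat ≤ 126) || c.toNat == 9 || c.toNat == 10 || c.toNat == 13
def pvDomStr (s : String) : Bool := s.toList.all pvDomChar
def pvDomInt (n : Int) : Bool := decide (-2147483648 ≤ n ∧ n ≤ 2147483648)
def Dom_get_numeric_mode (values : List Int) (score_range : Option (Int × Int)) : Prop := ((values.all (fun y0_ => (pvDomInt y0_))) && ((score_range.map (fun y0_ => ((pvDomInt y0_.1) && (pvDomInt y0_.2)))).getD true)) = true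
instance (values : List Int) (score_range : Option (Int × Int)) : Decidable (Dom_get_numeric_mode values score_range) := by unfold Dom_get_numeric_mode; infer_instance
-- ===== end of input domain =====

-- B sorts the distinct values first, counts each in the cleaned list, and returns modes[len//2]
-- uniformly (no Counter, no unique-mode branch); objective: alternative decomposition, return value only.


-- ===== PORT A =====
-- literal port of A: empty guard, range filter, Counter, max of the counts,
-- modes = keys with maximal count, unique-mode early return, else sort and take the middle.
def get_numeric_mode (values : List Int) (score_range : Option (Int × Int)) : Option Int :=
  if values = [] then none
  else
    let vals := match score_range with
      | some (lo, hi) => values.filter (fun v => decide (lo ≤ v) && decide (v ≤ hi))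
      | none => values
    if vals = [] then none
    else
      let counts := PySem.Dict.counter vals
      match PySem.List.max? counts.values (fun x => x) with
      | none => none   -- unreachable: counts is nonempty here (Python's max would raise on empty)
      | some max_count =>
        let modes := (counts.items.filter (fun p => p.2 == max_count)).map (fun p => p.1)
        if modes.length = 1 then modes[0]?
        else
          let ms := PySem.List.sorted modes (fun x => x) false
          ms[ms.length / 2]?

-- ===== PORT B =====
-- literal port of Source B: filter, sort, run-length scan of consecutive equal values
-- (distinct values with their run lengths, in ascending order), max, filter by zip, middle index.
def get_numeric_mode_alt (values : List Int) (score_range : Option (Int × Int)) : Option Int :=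
  let vals := match score_range with
    | some (lo, hi) => values.filter (fun v => decide (lo ≤ v) && decide (v ≤ hi))
    | none => values
  if vals = [] then none
  else
    let dc := (PySem.List.sorted vals (fun x => x) false).foldl
      (fun (dc : List Int × List Int) v =>
        if decide (dc.1 ≠ []) && (v == PySem.List.pyGetD dc.1 (-1) 0) then
          (dc.1, dc.2.dropLast ++ [PySem.List.pyGetD dc.2 (-1) 0 + 1])
        else (dc.1 ++ [v], dc.2 ++ [1])) ([], [])
    let distinct := dc.1
    let counts := dc.2
    match PySem.List.max? counts (fun x => x) with
    | none => none   -- unreachable: counts is nonempty here (Python's max would raise on empty)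
    | some best =>
      let modes := ((distinct.zip counts).filter (fun p : Int × Int => p.2 == best)).map (fun p : Int × Int => p.1)
      modes[modes.length / 2]?

-- ===== PRECONDITION & SPEC =====
def Spec_get_numeric_mode (values : List Int) (score_range : Option (Int × Int)) (out : Option Int) : Prop := out = get_numeric_mode_alt values score_range
instance (values : List Int) (score_range : Option (Int × Int)) (out : Option Int) : Decidable (Spec_get_numeric_mode values score_range out) := by unfold Spec_get_numeric_mode; infer_instance

-- ===== CLAIM (what is proved, stated in full; the proofs are below) =====
def Claim_equal_get_numeric_mode : Prop := ∀ (values : List Int) (score_range : Option (Int × Int)), Dom_get_numeric_mode values score_range → Spec_get_numeric_mode values score_range (get_numeric_mode values score_range)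

-- ===== LEMMAS AND PROOFS =====

-- max? with the identity key is invariant under permutation
theorem max?_id_perm {l1 l2 : List Int} (h : l1.Perm l2) :
    PySem.List.max? l1 (fun x => x) = PySem.List.max? l2 (fun x => x) := by
  rcases h1 : PySem.List.max? l1 (fun x => x) with _ | m1
  · have hnil : l1 = [] := (PySem.List.max?_eq_none_iff _ _).mp h1
    subst hnil
    have : l2 = [] := h.symm.eq_nil
    subst this
    exact ((PySem.List.max?_eq_none_iff _ _).mpr rfl).symm
  · rcases h2 : PySem.List.max? l2 (fun x => x) with _ | m2
    · have hnil : l2 = [] := (PySem.List.max?_eq_none_iff _ _).mp h2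
      subst hnil
      have : l1 = [] := h.eq_nil
      subst this
      rw [(PySem.List.max?_eq_none_iff _ _).mpr rfl] at h1
      cases h1
    · have hm1 : m1 ∈ l1 := PySem.List.max?_mem h1
      have hm2 : m2 ∈ l2 := PySem.List.max?_mem h2
      have hle1 : m1 ≤ m2 := PySem.List.max?_isMax h2 m1 (h.mem_iff.mp hm1)
      have hle2 : m2 ≤ m1 := PySem.List.max?_isMax h1 m2 (h.mem_iff.mpr hm2)
      rw [le_antisymm hle1 hle2]

-- xs[-1] with a default, on a nonempty list, is the last element
theorem pyGetD_neg_one (L : List Int) (h : L ≠ []) : PySem.List.pyGetD L (-1) 0 = L.getLast h := by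
  have hlen : 1 ≤ L.length := List.length_pos_iff.mpr h
  have hlt : L.length - 1 < L.length := by omega
  simp [PySem.List.pyGetD, PySem.List.pyGet?, PySem.List.pyIdx?, hlen,
    List.getElem?_eq_getElem hlt, List.getLast_eq_getElem]

-- in a ≤-sorted list, an element that bounds the whole list is the last one
theorem getLast_eq_of_le (L : List Int) (hL : L.Pairwise (· ≤ ·)) (v : Int) (hv : v ∈ L)
    (hmax : ∀ x ∈ L, x ≤ v) (h : L ≠ []) : L.getLast h = v := by
  have hlen : 0 < L.length := List.length_pos_iff.mpr h
  have h1 : v ≤ L[L.length - 1] := by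
    obtain ⟨i, hi, hiv⟩ := List.getElem_of_mem hv
    rcases Nat.lt_or_ge i (L.length - 1) with hlt | hge
    · have hp := List.pairwise_iff_getElem.mp hL i (L.length - 1) hi (by omega) hlt
      exact hiv ▸ hp
    · have hieq : i = L.length - 1 := by omega
      subst hieq
      exact le_of_eq hiv.symm
  have h2 : L[L.length - 1] ≤ v := hmax _ (List.getElem_mem _)
  rw [List.getLast_eq_getElem]
  exact le_antisymm h2 h1

-- ordered dedup of a snoc
theorem ofList_append_singleton (p : List Int) (v : Int) :
    PySem.Set.ofList (p ++ [v])
      = if v ∈ p then PySem.Set.ofList p else PySem.Set.ofList p ++ [v] := by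
  rw [PySem.Set.ofList_eq_foldl, List.foldl_append]
  rw [← PySem.Set.ofList_eq_foldl]
  simp only [List.foldl_cons, List.foldl_nil, PySem.Set.add]
  by_cases hv : v ∈ p
  · simp [hv, PySem.Set.contains, PySem.Set.mem_ofList]
  · simp [hv, PySem.Set.contains, PySem.Set.mem_ofList]

-- ordered dedup is a sublist
theorem ofList_sublist (xs : List Int) : (PySem.Set.ofList xs).Sublist xs := by
  induction xs using List.reverseRecOn with
  | nil => simp
  | append_singleton p v ih =>
    rw [ofList_append_singleton]
    by_cases hv : v ∈ p
    · rw [if_pos hv]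
      exact ih.trans (List.sublist_append_left p [v])
    · rw [if_neg hv]
      exact ih.append (List.Sublist.refl [v])

-- the run-length scan over a ≤-sorted suffix extends the (distinct values, run lengths) encoding
theorem runlen_fold (s : List Int) : ∀ (p : List Int), (p ++ s).Pairwise (· ≤ ·) →
    s.foldl (fun (dc : List Int × List Int) v =>
        if decide (dc.1 ≠ []) && (v == PySem.List.pyGetD dc.1 (-1) 0) then
          (dc.1, dc.2.dropLast ++ [PySem.List.pyGetD dc.2 (-1) 0 + 1])
        else (dc.1 ++ [v], dc.2 ++ [1]))
      (PySem.Set.ofList p, (PySem.Set.ofList p).map (fun k => (p.count k : Int)))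
    = (PySem.Set.ofList (p ++ s), (PySem.Set.ofList (p ++ s)).map (fun k => ((p ++ s).count k : Int))) := by
  induction s with
  | nil => intro p _; simp
  | cons v s' ih =>
    intro p hsort
    have hpair := List.pairwise_append.mp hsort
    have hpsort : p.Pairwise (· ≤ ·) := hpair.1
    have hps : ∀ x ∈ p, x ≤ v := fun x hx => hpair.2.2 x hx v (by simp)
    have hstep :
        (if decide ((PySem.Set.ofList p) ≠ []) && (v == PySem.List.pyGetD (PySem.Set.ofList p) (-1) 0) then
          (PySem.Set.ofList p, ((PySem.Set.ofList p).map (fun k => (p.count k : Int))).dropLast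
            ++ [PySem.List.pyGetD ((PySem.Set.ofList p).map (fun k => (p.count k : Int))) (-1) 0 + 1])
        else (PySem.Set.ofList p ++ [v], (PySem.Set.ofList p).map (fun k => (p.count k : Int)) ++ [1]))
        = (PySem.Set.ofList (p ++ [v]), (PySem.Set.ofList (p ++ [v])).map (fun k => ((p ++ [v]).count k : Int))) := by
      by_cases hv : v ∈ p
      · -- v continues the current run: the guard is true, the last count is bumped
        have hD : PySem.Set.ofList p ≠ [] :=
          List.ne_nil_of_mem ((PySem.Set.mem_ofList _ _).mpr hv)
        have hDsort : (PySem.Set.ofList p).Pairwise (· ≤ ·) := hpsort.sublist (ofList_sublist p)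
        have hDmax : ∀ x ∈ PySem.Set.ofList p, x ≤ v := fun x hx => hps x ((PySem.Set.mem_ofList _ _).mp hx)
        have hlast : (PySem.Set.ofList p).getLast hD = v :=
          getLast_eq_of_le _ hDsort v ((PySem.Set.mem_ofList _ _).mpr hv) hDmax hD
        have hcond : (decide ((PySem.Set.ofList p) ≠ []) && (v == PySem.List.pyGetD (PySem.Set.ofList p) (-1) 0)) = true := by
          rw [pyGetD_neg_one _ hD, hlast]
          simp [hD]
        rw [if_pos hcond]
        rw [ofList_append_singleton, if_pos hv]
        refine congrArg₂ Prod.mk rfl ?_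
        have hCne : (PySem.Set.ofList p).map (fun k => (p.count k : Int)) ≠ [] := by
          simpa using hD
        have hlastC : PySem.List.pyGetD ((PySem.Set.ofList p).map (fun k => (p.count k : Int))) (-1) 0
            = (p.count v : Int) := by
          rw [pyGetD_neg_one _ hCne, List.getLast_map, hlast]
        rw [hlastC]
        have hsplit : PySem.Set.ofList p = (PySem.Set.ofList p).dropLast ++ [v] := by
          conv_lhs => rw [← List.dropLast_append_getLast hD]
          rw [hlast]
        have hnodup : (PySem.Set.ofList p).Nodup := PySem.Set.nodup_ofList p
        have hvnot : v ∉ (PySem.Set.ofList p).dropLast := by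
          have h1 : ((PySem.Set.ofList p).dropLast ++ [v]).Nodup := hsplit ▸ hnodup
          have h2 := List.nodup_append.mp h1
          intro hmem
          exact h2.2.2 v hmem v (by simp) rfl
        calc ((PySem.Set.ofList p).map (fun k => (p.count k : Int))).dropLast ++ [(p.count v : Int) + 1]
            = ((PySem.Set.ofList p).dropLast.map (fun k => (p.count k : Int))) ++ [(p.count v : Int) + 1] := by
              rw [List.map_dropLast]
          _ = ((PySem.Set.ofList p).dropLast.map (fun k => ((p ++ [v]).count k : Int))) ++ [((p ++ [v]).count v : Int)] := by
              congr 1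
              · apply List.map_congr_left
                intro k hk
                have hkne : k ≠ v := fun he => hvnot (he ▸ hk)
                simp [List.count_append, Ne.symm hkne]
              · simp [List.count_append]
          _ = (PySem.Set.ofList p).map (fun k => ((p ++ [v]).count k : Int)) := by
              conv_rhs => rw [hsplit]
              rw [List.map_append]
              rfl
      · -- v starts a new run: the guard is false, a new (value, 1) pair is appended
        have hcond : (decide ((PySem.Set.ofList p) ≠ []) && (v == PySem.List.pyGetD (PySem.Set.ofList p) (-1) 0)) = false := by
          by_cases hD : PySem.Set.ofList p = []
          · simp [hD]
          · rw [pyGetD_neg_one _ hD]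
            have hlmem : (PySem.Set.ofList p).getLast hD ∈ p :=
              (PySem.Set.mem_ofList _ _).mp (List.getLast_mem hD)
            have hne : v ≠ (PySem.Set.ofList p).getLast hD := fun he => hv (he ▸ hlmem)
            simp [hne]
        simp only [hcond, Bool.false_eq_true, if_false]
        rw [ofList_append_singleton, if_neg hv]
        refine congrArg₂ Prod.mk rfl ?_
        rw [List.map_append]
        congr 1
        · apply List.map_congr_left
          intro k hk
          have hkp : k ∈ p := (PySem.Set.mem_ofList _ _).mp hk
          have hkne : k ≠ v := fun he => hv (he ▸ hkp)
          simp [List.count_append, Ne.symm hkne]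
        · simp [List.count_append, List.count_singleton, List.count_eq_zero.mpr hv]
    rw [List.foldl_cons, hstep]
    have hsort' : ((p ++ [v]) ++ s').Pairwise (· ≤ ·) := by
      simpa [List.append_assoc] using hsort
    have hih := ih (p ++ [v]) hsort'
    simpa [List.append_assoc] using hih

-- the core equality on the cleaned list (both programs after their empty guards)
theorem core_eq (vals : List Int) :
    (let counts := PySem.Dict.counter vals
     match PySem.List.max? counts.values (fun x => x) with
     | none => none
     | some max_count =>
       let modes := (counts.items.filter (fun p : Int × Int => p.2 == max_count)).map (fun p : Int × Int => p.1)
       if modes.length = 1 then modes[0]?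
       else
         let ms := PySem.List.sorted modes (fun x => x) false
         ms[ms.length / 2]?)
    =
    (let dc := (PySem.List.sorted vals (fun x => x) false).foldl
      (fun (dc : List Int × List Int) v =>
        if decide (dc.1 ≠ []) && (v == PySem.List.pyGetD dc.1 (-1) 0) then
          (dc.1, dc.2.dropLast ++ [PySem.List.pyGetD dc.2 (-1) 0 + 1])
        else (dc.1 ++ [v], dc.2 ++ [1])) ([], [])
     let distinct := dc.1
     let counts := dc.2
     match PySem.List.max? counts (fun x => x) with
     | none => none
     | some best =>
       let modes := ((distinct.zip counts).filter (fun p : Int × Int => p.2 == best)).map (fun p : Int × Int => p.1)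
       modes[modes.length / 2]?) := by
  have hpermS : (PySem.List.sorted vals (fun x : Int => x) false).Perm vals :=
    PySem.List.sorted_perm _ _ _
  have hsortS : (PySem.List.sorted vals (fun x : Int => x) false).Pairwise (· ≤ ·) := by
    simpa using PySem.List.sorted_pairwise vals (fun x : Int => x)
  have hfold := runlen_fold (PySem.List.sorted vals (fun x : Int => x) false) []
    (by simpa using hsortS)
  rw [List.nil_append] at hfold
  have h0 : ((PySem.Set.ofList ([] : List Int)),
      (PySem.Set.ofList ([] : List Int)).map (fun k => ((([] : List Int).count k : Nat) : Int)))
      = (([] : List Int), ([] : List Int)) := rfl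
  rw [h0] at hfold
  rw [hfold]
  have hcnt : (fun k : Int => (((PySem.List.sorted vals (fun x : Int => x) false).count k : Nat) : Int))
      = (fun k : Int => ((vals.count k : Nat) : Int)) := by
    funext k
    rw [hpermS.count_eq]
  rw [hcnt]
  have hcount : (fun d => (PySem.List.count vals d : Int)) = (fun k : Int => ((vals.count k : Nat) : Int)) := by
    funext d; simp [PySem.List.count_eq]
  have hitems : (PySem.Dict.counter vals).items
      = (PySem.Set.ofList vals).map (fun k => (k, ((vals.count k : Nat) : Int))) :=
    PySem.Dict.items_counter vals
  have hvalues : (PySem.Dict.counter vals).values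
      = (PySem.Set.ofList vals).map (fun k : Int => ((vals.count k : Nat) : Int)) := by
    simp [PySem.Dict.values, hitems, List.map_map, Function.comp]
  simp only [hvalues, hitems]
  have hpermD : (PySem.Set.ofList (PySem.List.sorted vals (fun x : Int => x) false)).Perm
      (PySem.Set.ofList vals) := by
    refine (List.perm_ext_iff_of_nodup (PySem.Set.nodup_ofList _) (PySem.Set.nodup_ofList _)).mpr ?_
    intro a
    rw [PySem.Set.mem_ofList, PySem.Set.mem_ofList, hpermS.mem_iff]
  set D := PySem.Set.ofList (PySem.List.sorted vals (fun x : Int => x) false) with hD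
  have hmax : PySem.List.max? ((PySem.Set.ofList vals).map (fun k : Int => ((vals.count k : Nat) : Int))) (fun x => x)
      = PySem.List.max? (D.map (fun k : Int => ((vals.count k : Nat) : Int))) (fun x => x) :=
    max?_id_perm (hpermD.symm.map _)
  rw [hmax]
  cases hm : PySem.List.max? (D.map (fun k : Int => ((vals.count k : Nat) : Int))) (fun x => x) with
  | none => rfl
  | some mc =>
    have hzip : D.zip (D.map (fun k : Int => ((vals.count k : Nat) : Int)))
        = D.map (fun k : Int => (k, ((vals.count k : Nat) : Int))) := by
      have := List.zip_map' (f := fun a : Int => a) (g := fun k : Int => ((vals.count k : Nat) : Int)) (l := D)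
      simpa using this
    have hmodesA : (((PySem.Set.ofList vals).map (fun k : Int => (k, ((vals.count k : Nat) : Int)))).filter
          (fun p : Int × Int => p.2 == mc)).map (fun p : Int × Int => p.1)
        = (PySem.Set.ofList vals).filter (fun k : Int => ((vals.count k : Nat) : Int) == mc) := by
      rw [List.filter_map, List.map_map]
      simp only [Function.comp_def]
      simp
    have hmodesB : ((D.map (fun k : Int => (k, ((vals.count k : Nat) : Int)))).filter
          (fun p : Int × Int => p.2 == mc)).map (fun p : Int × Int => p.1)
        = D.filter (fun k : Int => ((vals.count k : Nat) : Int) == mc) := by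
      rw [List.filter_map, List.map_map]
      simp only [Function.comp_def]
      simp
    simp only [hzip, hmodesA, hmodesB]
    set q : Int → Bool := fun k : Int => ((vals.count k : Nat) : Int) == mc with hq
    set MA := (PySem.Set.ofList vals).filter q with hMA
    set MB := D.filter q with hMB
    have hpermM : MB.Perm MA := hpermD.filter q
    have hDpw : D.Pairwise (· < ·) := by
      have hle : D.Pairwise (· ≤ ·) := hsortS.sublist (ofList_sublist _)
      have hne : D.Pairwise (· ≠ ·) := PySem.Set.nodup_ofList _
      exact (hle.and hne).imp (fun h => lt_of_le_of_ne h.1 h.2)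
    have hpwM : MB.Pairwise (· < ·) := hDpw.filter q
    have hsorted : PySem.List.sorted MA (fun x => x) false = MB :=
      PySem.List.sorted_eq_of_perm_of_pairwise_lt _ _ _ hpermM hpwM
    have hlen : MB.length = MA.length := hpermM.length_eq
    by_cases h1 : MA.length = 1
    · simp only [if_pos h1]
      obtain ⟨a, ha⟩ := List.length_eq_one_iff.mp h1
      have hB : MB = [a] := List.perm_singleton.mp (ha ▸ hpermM)
      rw [ha, hB]
      simp
    · simp only [if_neg h1]
      rw [hsorted]

-- ===== VERDICT (by name: the statement is the Claim_ definition above) =====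
theorem get_numeric_mode_spec : Claim_equal_get_numeric_mode := by
  intro values score_range _
  unfold Spec_get_numeric_mode get_numeric_mode get_numeric_mode_alt
  by_cases hval : values = []
  · subst hval; cases score_range with
    | none => simp
    | some p => cases p; simp
  · simp only [if_neg hval]
    set vals := (match score_range with
      | some (lo, hi) => values.filter (fun v => decide (lo ≤ v) && decide (v ≤ hi))
      | none => values) with hvals
    by_cases hv : vals = []
    · simp [hv]
    · simp only [if_neg hv]
      exact core_eq vals
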